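-- pv_equiv track=rewrite | github.com/niteeshaiml1/Python_Programs | revision/sum_odd_dig.py | sum_odd_dig
-- ===== SOURCE A (Python) =====
-- def sum_odd_dig(num):
--     sum_odd=0
--     temp=num
--     while temp>0:
--         dig=temp%10
--         temp=temp//10
--         if dig%2!=0:
--             sum_odd+=dig
--     return sum_odd
-- ===== SOURCE B (Python) =====
-- def sum_odd_dig(num):
--     if num > 0:
--         return sum(int(c) for c in str(num) if int(c) % 2)
--     return 0
-- ===== Notes on version B (the rewrite author's own statement) =====
-- stated objective: idiomatic
-- what changed: B sums the odd digits by iterating over the characters of str(num) left-to-right instead of peeling digits arithmetically with modulo and floor division in a while loop.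
import Mathlib
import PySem

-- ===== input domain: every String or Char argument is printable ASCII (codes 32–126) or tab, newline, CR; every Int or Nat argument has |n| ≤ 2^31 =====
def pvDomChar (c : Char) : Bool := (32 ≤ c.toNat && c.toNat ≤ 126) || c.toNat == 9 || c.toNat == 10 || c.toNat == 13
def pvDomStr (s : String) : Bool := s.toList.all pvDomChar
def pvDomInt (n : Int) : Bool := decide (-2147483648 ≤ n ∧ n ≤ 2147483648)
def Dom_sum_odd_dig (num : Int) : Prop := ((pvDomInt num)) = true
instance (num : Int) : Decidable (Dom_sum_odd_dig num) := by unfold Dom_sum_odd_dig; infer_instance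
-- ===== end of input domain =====

-- B iterates over the characters of str(num) instead of A's arithmetic %10 // 10 digit-peeling loop (idiomatic rewrite, same cost).

-- ===== PORT A =====
-- the while loop of A: state (temp, sum_odd)
def sumOddDigLoop (temp : Int) (sum_odd : Int) : Int :=
  if _h : temp > 0 then
    let dig := PySem.Int.mod temp 10
    let temp' := PySem.Int.floordiv temp 10
    sumOddDigLoop temp' (if PySem.Int.mod dig 2 ≠ 0 then sum_odd + dig else sum_odd)
  else sum_odd
termination_by temp.toNat
decreasing_by
  have h10 : PySem.Int.floordiv temp 10 = temp / 10 := PySem.Int.floordiv_eq_ediv_of_pos (by omega)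
  simp only [h10]
  omega

def sum_odd_dig (num : Int) : Int :=
  sumOddDigLoop num 0

-- ===== PORT B =====
-- int(c) for a single character c
def charInt (c : Char) : Int := (PySem.Int.ofChars? [c]).getD 0

def sum_odd_dig_alt (num : Int) : Int :=
  if num > 0 then
    -- sum(int(c) for c in str(num) if int(c) % 2)
    (((PySem.Int.toChars num).filter (fun c => PySem.Int.mod (charInt c) 2 != 0)).map charInt).sum
  else 0

-- ===== PRECONDITION & SPEC =====
def Spec_sum_odd_dig (num : Int) (out : Int) : Prop := out = sum_odd_dig_alt num
instance (num : Int) (out : Int) : Decidable (Spec_sum_odd_dig num out) := by unfold Spec_sum_odd_dig; infer_instance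

-- ===== CLAIM (what is proved, stated in full; the proofs are below) =====
def Claim_equal_sum_odd_dig : Prop := ∀ (num : Int), Dom_sum_odd_dig num → Spec_sum_odd_dig num (sum_odd_dig num)

-- ===== LEMMAS AND PROOFS =====

-- the common reference value: sum of the odd decimal digits of m
def oddSum (m : Nat) : Int :=
  (((Nat.digits 10 m).filter (fun d => d % 2 = 1)).map (Int.ofNat)).sum

lemma sumOddDigLoop_eq (temp acc : Int) : sumOddDigLoop temp acc = acc + oddSum temp.toNat := by
  by_cases h : temp > 0
  · rw [sumOddDigLoop]
    simp only [h, dif_pos]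
    have h10 : PySem.Int.floordiv temp 10 = temp / 10 := PySem.Int.floordiv_eq_ediv_of_pos (by omega)
    have hm10 : PySem.Int.mod temp 10 = temp % 10 := PySem.Int.mod_eq_emod_of_pos (by omega)
    have hm2 : PySem.Int.mod (temp % 10) 2 = (temp % 10) % 2 := PySem.Int.mod_eq_emod_of_pos (by omega)
    have ih := sumOddDigLoop_eq (temp / 10)
    have hdig : Nat.digits 10 temp.toNat = temp.toNat % 10 :: Nat.digits 10 (temp.toNat / 10) :=
      Nat.digits_def' (by omega) (by omega)
    have htn : (temp / 10).toNat = temp.toNat / 10 := by omega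
    rw [hm10, h10, hm2]
    have hsum : oddSum temp.toNat =
        (if (temp % 10) % 2 ≠ 0 then ((temp % 10 : Int)) else 0) + oddSum (temp.toNat / 10) := by
      unfold oddSum
      rw [hdig]
      by_cases hodd : temp.toNat % 10 % 2 = 1
      · rw [List.filter_cons_of_pos (by simpa using hodd),
          if_pos (by omega : ¬ ((temp % 10) % 2 = 0))]
        simp only [List.map_cons, List.sum_cons, Int.ofNat_eq_natCast]
        omega
      · rw [List.filter_cons_of_neg (by simpa using hodd), if_neg (by omega)]
        simp
    by_cases hodd : (temp % 10) % 2 ≠ 0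
    · rw [if_pos hodd, ih, hsum, if_pos hodd, htn]; ring
    · rw [if_neg hodd, ih, hsum, if_neg hodd, htn]; ring
  · rw [sumOddDigLoop]
    simp only [h, dif_neg, not_false_iff]
    have : temp.toNat = 0 := by omega
    rw [this]
    simp [oddSum]
termination_by temp.toNat
decreasing_by omega

-- Nat.toDigits via Nat.digits
lemma toDigitsCore_eq (f : Nat) : ∀ (n : Nat) (ds : List Char), n < f →
    Nat.toDigitsCore 10 f n ds =
      (if n = 0 then ['0'] else ((Nat.digits 10 n).map Nat.digitChar).reverse) ++ ds := by
  induction f with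
  | zero => intro n ds h; omega
  | succ f ih =>
    intro n ds h
    rw [Nat.toDigitsCore]
    by_cases h0 : n = 0
    · subst h0
      simp
      decide
    · simp only [if_neg h0]
      have hdig : Nat.digits 10 n = n % 10 :: Nat.digits 10 (n / 10) :=
        Nat.digits_def' (by omega) (by omega)
      by_cases hq : n / 10 = 0
      · rw [hdig]
        simp [hq]
      · simp only [if_neg hq]
        rw [ih (n / 10) _ (by omega)]
        simp only [if_neg hq, hdig]
        simp

lemma toDigits_eq (n : Nat) (h : 0 < n) :
    Nat.toDigits 10 n = ((Nat.digits 10 n).map Nat.digitChar).reverse := by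
  unfold Nat.toDigits
  rw [toDigitsCore_eq (n + 1) n [] (by omega), if_neg (by omega)]
  simp

lemma charInt_digitChar (d : Nat) (h : d < 10) : charInt (Nat.digitChar d) = (d : Int) := by
  interval_cases d <;> decide

lemma sum_chars_eq (l : List Nat) (hl : ∀ d ∈ l, d < 10) :
    ((((l.map Nat.digitChar).filter (fun c => PySem.Int.mod (charInt c) 2 != 0)).map charInt)).sum
      = ((l.filter (fun d => d % 2 = 1)).map Int.ofNat).sum := by
  induction l with
  | nil => simp
  | cons d tl ih =>
    have hd : d < 10 := hl d (by simp)
    have hce : charInt (Nat.digitChar d) = (d : Int) := charInt_digitChar d hd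
    have ih' := ih (fun e he => hl e (List.mem_cons_of_mem _ he))
    simp only [List.map_cons, List.filter_cons, hce]
    by_cases hodd : d % 2 = 1
    · have hb : (PySem.Int.mod ((d : Int)) 2 != 0) = true := by
        rw [PySem.Int.mod_eq_emod_of_pos (by omega)]
        simp only [bne_iff_ne, ne_eq]
        omega
      have hb2 : decide (d % 2 = 1) = true := by simpa using hodd
      rw [hb, hb2]
      simp only [if_pos, List.map_cons, List.sum_cons, hce]
      rw [ih']
      simp [Int.ofNat_eq_natCast]
    · have hb : (PySem.Int.mod ((d : Int)) 2 != 0) = false := by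
        rw [PySem.Int.mod_eq_emod_of_pos (by omega)]
        simp only [bne_eq_false_iff_eq]
        omega
      have hb2 : decide (d % 2 = 1) = false := by simpa using hodd
      rw [hb, hb2]
      simp only [Bool.false_eq_true, if_neg, not_false_iff]
      exact ih'

lemma alt_eq_oddSum (num : Int) (h : 0 < num) : sum_odd_dig_alt num = oddSum num.toNat := by
  unfold sum_odd_dig_alt
  rw [if_pos h]
  have htc : PySem.Int.toChars num = Nat.toDigits 10 num.toNat := by
    unfold PySem.Int.toChars
    rw [if_neg (by omega)]
  rw [htc, toDigits_eq num.toNat (by omega)]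
  rw [List.filter_reverse, List.map_reverse, List.sum_reverse]
  unfold oddSum
  exact sum_chars_eq _ (fun d hd => Nat.digits_lt_base (by omega) hd)

-- ===== VERDICT (by name: the statement is the Claim_ definition above) =====
theorem sum_odd_dig_spec : Claim_equal_sum_odd_dig := by
  intro num _
  unfold Spec_sum_odd_dig sum_odd_dig
  rw [sumOddDigLoop_eq]
  by_cases h : 0 < num
  · rw [alt_eq_oddSum num h]; ring
  · unfold sum_odd_dig_alt
    rw [if_neg (by omega)]
    have : num.toNat = 0 := by omega
    rw [this]
    simp [oddSum]
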